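-- pv_equiv track=rewrite | github.com/djaodjin/drop | src/tero/setup/__init__.py | next_token_in_config
-- ===== SOURCE A (Python) =====
-- def next_token_in_config(remain,
--                          sep='=', enter_block_sep='{', exit_block_sep='}'):
--     sep = sep.strip()
--     if enter_block_sep and exit_block_sep:
--         seps = [sep, enter_block_sep, exit_block_sep]
--     else:
--         seps = [sep]
--     token = None
--     # Skip whitespaces
--     idx = 0
--     while idx < len(remain) and remain[idx] in [' ', '\t', '\n']:
--         idx = idx + 1
--     indent = remain[:idx]
--     remain = remain[idx:]
--     if remain and remain[0] in seps:
--         token = remain[0]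
--         remain = remain[1:]
--     else:
--         idx = 0
--         while idx < len(remain) and not remain[idx] in [sep, ' ', '\t', '\n']:
--             idx = idx + 1
--         if remain[:idx]:
--             token = remain[:idx]
--         remain = remain[idx:]
--     return indent, token, remain
-- ===== SOURCE B (Python) =====
-- def next_token_in_config(remain,
--                          sep='=', enter_block_sep='{', exit_block_sep='}'):
--     sep = sep.strip()
--     if enter_block_sep and exit_block_sep:
--         seps = (sep, enter_block_sep, exit_block_sep)
--     else:
--         seps = (sep,)
--     # single pass over the characters with an explicit state machine:
--     # collect indent chars while outside the token, then either return a
--     # separator immediately or accumulate token chars until a stop char.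
--     indent = []
--     token = []
--     in_token = False
--     for pos, char in enumerate(remain):
--         if not in_token:
--             if char in (' ', '\t', '\n'):
--                 indent.append(char)
--                 continue
--             if char in seps:
--                 return ''.join(indent), char, remain[pos + 1:]
--             in_token = True
--         if char == sep or char in (' ', '\t', '\n'):
--             return ''.join(indent), ''.join(token) or None, remain[pos:]
--         token.append(char)
--     return ''.join(indent), ''.join(token) or None, ''
-- ===== Notes on version B (the rewrite author's own statement) =====
-- stated objective: alternative
-- what changed: Replaces A's two staged index-scanning while loops plus slicing (skip whitespace, then re-scan for the token end) with a single enumerate pass: an explicit state machine (outside/inside token) that accumulates indent and token character lists and returns early at a separator or stop character; measured constant-factor faster in Python.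
import Mathlib
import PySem

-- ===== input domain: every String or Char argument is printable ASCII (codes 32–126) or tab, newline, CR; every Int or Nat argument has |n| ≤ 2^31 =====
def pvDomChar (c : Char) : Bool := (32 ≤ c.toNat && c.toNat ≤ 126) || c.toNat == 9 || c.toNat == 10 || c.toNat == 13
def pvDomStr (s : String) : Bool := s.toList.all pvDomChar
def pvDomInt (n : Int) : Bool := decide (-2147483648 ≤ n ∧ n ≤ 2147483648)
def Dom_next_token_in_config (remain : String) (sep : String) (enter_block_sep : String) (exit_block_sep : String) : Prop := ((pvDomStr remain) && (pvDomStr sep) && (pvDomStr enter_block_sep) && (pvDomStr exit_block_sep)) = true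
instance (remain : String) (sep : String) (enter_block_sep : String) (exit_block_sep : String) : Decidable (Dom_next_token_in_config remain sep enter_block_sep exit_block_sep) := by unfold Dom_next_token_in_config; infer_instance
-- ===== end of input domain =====

-- B replaces A's two staged index-scanning loops (skip whitespace, then re-scan for
-- the token, with slicing in between) by ONE pass over the characters: an explicit
-- state machine with indent/token accumulators and early returns (measured
-- constant-factor faster in Python in a timing run).

-- ===== PORT A =====
-- the first while loop: "while idx < len(remain) and remain[idx] in [' ','\t','\n']",
-- returning (remain[:idx], remain[idx:])
def ntcA_skipWs : List Char → List Char × List Char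
  | [] => ([], [])
  | c :: cs =>
    if c == ' ' || c == '\t' || c == '\n' then
      let p := ntcA_skipWs cs
      (c :: p.1, p.2)
    else ([], c :: cs)

-- the second while loop: "while idx < len(remain) and not remain[idx] in [sep,' ','\t','\n']",
-- returning (remain[:idx], remain[idx:]); 'remain[idx] in [sep,…]' compares the 1-char string to sep
def ntcA_scanTok (sep : List Char) : List Char → List Char × List Char
  | [] => ([], [])
  | c :: cs =>
    if [c] == sep || c == ' ' || c == '\t' || c == '\n' then ([], c :: cs)
    else
      let p := ntcA_scanTok sep cs
      (c :: p.1, p.2)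

def next_token_in_config (remain : String) (sep : String) (enter_block_sep : String) (exit_block_sep : String) : String × Option String × String :=
  let sep' := PySem.Chars.strip sep.toList
  let seps : List (List Char) :=
    if enter_block_sep.toList ≠ [] ∧ exit_block_sep.toList ≠ [] then
      [sep', enter_block_sep.toList, exit_block_sep.toList]
    else [sep']
  let p := ntcA_skipWs remain.toList
  let indent := p.1
  let rest := p.2
  -- the else-branch of "if remain and remain[0] in seps" (the second scanning loop)
  let elsePath : Unit → String × Option String × String := fun _ =>
    let q := ntcA_scanTok sep' rest
    (String.ofList indent, if q.1.isEmpty then none else some (String.ofList q.1), String.ofList q.2)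
  match rest with
  | c :: cs =>
    if seps.contains [c] then (String.ofList indent, some (String.ofList [c]), String.ofList cs)
    else elsePath ()
  | [] => elsePath ()

-- ===== PORT B =====
-- the single "for pos, char in enumerate(remain)" loop: state = (indent acc, token acc,
-- in_token flag); accumulators are consed and reversed at the ''.join(...) return points;
-- remain[pos+1:] / remain[pos:] are cs / c::cs of the list being walked
def ntcB_loop (sep' : List Char) (seps : List (List Char)) :
    List Char → List Char → List Char → Bool → String × Option String × String
  | [], ind, tok, _ =>
      (String.ofList ind.reverse,
       if tok.isEmpty then none else some (String.ofList tok.reverse),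
       String.ofList [])
  | c :: cs, ind, tok, inTok =>
      if !inTok && (c == ' ' || c == '\t' || c == '\n') then
        ntcB_loop sep' seps cs (c :: ind) tok inTok
      else if !inTok && seps.contains [c] then
        (String.ofList ind.reverse, some (String.ofList [c]), String.ofList cs)
      else if [c] == sep' || c == ' ' || c == '\t' || c == '\n' then
        (String.ofList ind.reverse,
         if tok.isEmpty then none else some (String.ofList tok.reverse),
         String.ofList (c :: cs))
      else ntcB_loop sep' seps cs ind (c :: tok) true

def next_token_in_config_alt (remain : String) (sep : String) (enter_block_sep : String) (exit_block_sep : String) : String × Option String × String :=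
  let sep' := PySem.Chars.strip sep.toList
  let seps : List (List Char) :=
    if enter_block_sep.toList ≠ [] ∧ exit_block_sep.toList ≠ [] then
      [sep', enter_block_sep.toList, exit_block_sep.toList]
    else [sep']
  ntcB_loop sep' seps remain.toList [] [] false

-- ===== PRECONDITION & SPEC =====
def Spec_next_token_in_config (remain : String) (sep : String) (enter_block_sep : String) (exit_block_sep : String) (out : String × Option String × String) : Prop := out = next_token_in_config_alt remain sep enter_block_sep exit_block_sep
instance (remain : String) (sep : String) (enter_block_sep : String) (exit_block_sep : String) (out : String × Option String × String) : Decidable (Spec_next_token_in_config remain sep enter_block_sep exit_block_sep out) := by unfold Spec_next_token_in_config; infer_instance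

-- ===== CLAIM (what is proved, stated in full; the proofs are below) =====
def Claim_equal_next_token_in_config : Prop := ∀ (remain : String) (sep : String) (enter_block_sep : String) (exit_block_sep : String), Dom_next_token_in_config remain sep enter_block_sep exit_block_sep → Spec_next_token_in_config remain sep enter_block_sep exit_block_sep (next_token_in_config remain sep enter_block_sep exit_block_sep)

-- ===== LEMMAS AND PROOFS =====

-- the whitespace test and the token-stop test, as predicates for takeWhile/dropWhile
def ntcWsP (c : Char) : Bool := c == ' ' || c == '\t' || c == '\n'
def ntcTokP (sep' : List Char) (c : Char) : Bool := !([c] == sep' || c == ' ' || c == '\t' || c == '\n')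

-- what both programs do once the leading whitespace (already in `indent`) is gone
def ntcAfterWs (sep' : List Char) (seps : List (List Char)) (indent : List Char) :
    List Char → String × Option String × String
  | [] => (String.ofList indent, none, String.ofList [])
  | c :: cs =>
    if seps.contains [c] then
      (String.ofList indent, some (String.ofList [c]), String.ofList cs)
    else
      (String.ofList indent,
       (if ((c :: cs).takeWhile (ntcTokP sep')).isEmpty then none
        else some (String.ofList ((c :: cs).takeWhile (ntcTokP sep')))),
       String.ofList ((c :: cs).dropWhile (ntcTokP sep')))

theorem ntcA_skipWs_eq (l : List Char) :
    ntcA_skipWs l = (l.takeWhile ntcWsP, l.dropWhile ntcWsP) := by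
  induction l with
  | nil => simp [ntcA_skipWs]
  | cons c cs ih =>
    by_cases h : (c == ' ' || c == '\t' || c == '\n') = true
    · simp [ntcA_skipWs, ntcWsP, h, ih]
    · simp [ntcA_skipWs, ntcWsP, h]

theorem ntcA_scanTok_eq (sep : List Char) (l : List Char) :
    ntcA_scanTok sep l = (l.takeWhile (ntcTokP sep), l.dropWhile (ntcTokP sep)) := by
  induction l with
  | nil => simp [ntcA_scanTok]
  | cons c cs ih =>
    by_cases h : ([c] == sep || c == ' ' || c == '\t' || c == '\n') = true
    · unfold ntcA_scanTok
      rw [if_pos h, List.takeWhile_cons_of_neg (by simp [ntcTokP, h]),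
          List.dropWhile_cons_of_neg (by simp [ntcTokP, h])]
    · unfold ntcA_scanTok
      rw [if_neg h, List.takeWhile_cons_of_pos (by simp [ntcTokP]; simpa using h),
          List.dropWhile_cons_of_pos (by simp [ntcTokP]; simpa using h), ih]

-- A computes exactly ntcAfterWs of its whitespace split
theorem ntcA_eq_afterWs (remain sep ebs xbs : String) :
    next_token_in_config remain sep ebs xbs
      = ntcAfterWs (PySem.Chars.strip sep.toList)
          (if ebs.toList ≠ [] ∧ xbs.toList ≠ [] then
            [PySem.Chars.strip sep.toList, ebs.toList, xbs.toList]
          else [PySem.Chars.strip sep.toList])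
          (remain.toList.takeWhile ntcWsP) (remain.toList.dropWhile ntcWsP) := by
  unfold next_token_in_config
  simp only [ntcA_skipWs_eq, ntcA_scanTok_eq]
  cases hdw : remain.toList.dropWhile ntcWsP with
  | nil => simp [ntcAfterWs]
  | cons c cs => simp [ntcAfterWs]

-- B's loop in the token phase computes the second scan, appended to the accumulator
theorem ntcB_loop_tok (sep' : List Char) (seps : List (List Char)) (l : List Char) :
    ∀ ind tok, ntcB_loop sep' seps l ind tok true
      = (String.ofList ind.reverse,
         (if (tok.reverse ++ l.takeWhile (ntcTokP sep')).isEmpty then none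
          else some (String.ofList (tok.reverse ++ l.takeWhile (ntcTokP sep')))),
         String.ofList (l.dropWhile (ntcTokP sep'))) := by
  induction l with
  | nil =>
    intro ind tok
    simp [ntcB_loop]
  | cons c cs ih =>
    intro ind tok
    by_cases h : ([c] == sep' || c == ' ' || c == '\t' || c == '\n') = true
    · unfold ntcB_loop
      rw [if_neg (by simp), if_neg (by simp), if_pos h,
          List.takeWhile_cons_of_neg (by simp [ntcTokP, h]),
          List.dropWhile_cons_of_neg (by simp [ntcTokP, h])]
      simp
    · unfold ntcB_loop
      rw [if_neg (by simp), if_neg (by simp), if_neg h, ih ind (c :: tok),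
          List.takeWhile_cons_of_pos (by simp [ntcTokP]; simpa using h),
          List.dropWhile_cons_of_pos (by simp [ntcTokP]; simpa using h)]
      simp

-- B's loop in the indent phase computes ntcAfterWs of the whitespace split
theorem ntcB_loop_ind (sep' : List Char) (seps : List (List Char)) (l : List Char) :
    ∀ ind, ntcB_loop sep' seps l ind [] false
      = ntcAfterWs sep' seps (ind.reverse ++ l.takeWhile ntcWsP) (l.dropWhile ntcWsP) := by
  induction l with
  | nil => intro ind; simp [ntcB_loop, ntcAfterWs]
  | cons c cs ih =>
    intro ind
    by_cases hw : (c == ' ' || c == '\t' || c == '\n') = true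
    · unfold ntcB_loop
      rw [if_pos (by simp [hw]), ih (c :: ind),
          List.takeWhile_cons_of_pos (by simpa [ntcWsP] using hw),
          List.dropWhile_cons_of_pos (by simpa [ntcWsP] using hw)]
      simp
    · rw [List.takeWhile_cons_of_neg (by simpa [ntcWsP] using hw),
          List.dropWhile_cons_of_neg (by simpa [ntcWsP] using hw)]
      by_cases hc : seps.contains [c] = true
      · have hm : [c] ∈ seps := by simpa using hc
        unfold ntcB_loop
        rw [if_neg (by simp [hw]), if_pos (by simpa using hc)]
        simp [ntcAfterWs, hm]
      · have hm : [c] ∉ seps := by simpa using hc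
        by_cases hs : ([c] == sep' || c == ' ' || c == '\t' || c == '\n') = true
        · have hpf : ntcTokP sep' c = false := by simp [ntcTokP, hs]
          unfold ntcB_loop
          rw [if_neg (by simp [hw]), if_neg (by simpa using hc), if_pos hs]
          simp [ntcAfterWs, hm, hpf]
        · have h0 : ([c] == sep' || c == ' ' || c == '\t' || c == '\n') = false := by
            simpa using hs
          have hpt : ntcTokP sep' c = true := by simp [ntcTokP, h0]
          unfold ntcB_loop
          rw [if_neg (by simp [hw]), if_neg (by simpa using hc), if_neg hs,
              ntcB_loop_tok sep' seps cs ind [c]]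
          simp [ntcAfterWs, hm, hpt]

-- ===== VERDICT (by name: the statement is the Claim_ definition above) =====
theorem next_token_in_config_spec : Claim_equal_next_token_in_config := by
  intro remain sep ebs xbs _
  unfold Spec_next_token_in_config next_token_in_config_alt
  rw [ntcA_eq_afterWs, ntcB_loop_ind]
  simp
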